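-- pv_equiv track=rewrite | github.com/fredjeong/coding-test-prep | 프로그래머스/1/86491. 최소직사각형/최소직사각형.py | solution
-- ===== SOURCE A (Python) =====
-- def solution(sizes):
--     widths = []
--     heights = []
--     for i in sizes:
--         a, b = max(i), min(i)
--         widths.append(a)
--         heights.append(b)
--     answer = max(widths) * max(heights)
--     return answer
-- ===== SOURCE B (Python) =====
-- def solution(sizes):
--     def rec(cards):
--         if len(cards) == 1:
--             c = sorted(cards[0])
--             return c[-1], c[0]
--         mid = len(cards) // 2
--         w1, h1 = rec(cards[:mid])
--         w2, h2 = rec(cards[mid:])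
--         return max(w1, w2), max(h1, h2)
--     w, h = rec(sizes)
--     return w * h
-- ===== Notes on version B (the rewrite author's own statement) =====
-- stated objective: alternative
-- what changed: Divide-and-conquer recursion that splits the card list in halves and merges (maxW, maxH) pairs, with each single card reduced by sorting it and taking its last/first element, instead of A's linear pass building widths/heights lists and applying max to each.
-- outside the precondition, e.g. on solution([]): A raises ValueError, B raises RecursionError; on solution([[]]): A raises ValueError, B raises IndexError
import Mathlib
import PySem

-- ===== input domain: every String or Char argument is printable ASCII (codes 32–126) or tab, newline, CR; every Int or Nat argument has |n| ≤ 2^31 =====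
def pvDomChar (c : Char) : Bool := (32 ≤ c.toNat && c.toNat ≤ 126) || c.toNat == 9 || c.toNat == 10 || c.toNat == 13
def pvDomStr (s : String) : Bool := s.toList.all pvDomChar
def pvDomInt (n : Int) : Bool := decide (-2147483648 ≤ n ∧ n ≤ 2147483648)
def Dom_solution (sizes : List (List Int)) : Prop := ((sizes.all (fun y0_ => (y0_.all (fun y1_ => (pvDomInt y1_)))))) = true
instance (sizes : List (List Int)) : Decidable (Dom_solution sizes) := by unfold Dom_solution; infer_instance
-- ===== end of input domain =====

-- B is a divide-and-conquer recursion over halves of the card list (base case: sort a card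
-- and take its endpoints) instead of A's list-building pass; return values agree wherever A returns.

-- ===== PORT A =====
def solution (sizes : List (List Int)) : Int :=
  let wh := sizes.foldl (fun (wh : List Int × List Int) i =>
    let a := (PySem.List.max? i (fun y => y)).getD 0
    let b := (PySem.List.min? i (fun y => y)).getD 0
    (wh.1 ++ [a], wh.2 ++ [b])) ([], [])
  ((PySem.List.max? wh.1 (fun y => y)).getD 0) * ((PySem.List.max? wh.2 (fun y => y)).getD 0)

-- ===== PORT B =====
-- rec(cards) of Source B.  On the empty list Python's recursion never terminates (RecursionError,
-- outside Pre_); the `cards.length < 1` branch is only the totality guard for that case.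
def solutionAltRec (cards : List (List Int)) : Int × Int :=
  if cards.length = 1 then
    let c := PySem.List.sorted ((PySem.List.pyGet? cards 0).getD []) (fun y => y) false
    ((PySem.List.pyGet? c (-1)).getD 0, (PySem.List.pyGet? c 0).getD 0)
  else if cards.length < 1 then (0, 0)
  else
    let mid : Int := PySem.Int.floordiv cards.length 2
    let p1 := solutionAltRec (PySem.List.slice cards none (some mid))
    let p2 := solutionAltRec (PySem.List.slice cards (some mid) none)
    (max p1.1 p2.1, max p1.2 p2.2)
termination_by cards.length
decreasing_by
  all_goals
    rename_i h1 h2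
    have hlen : 2 ≤ cards.length := by omega
    have hmid : PySem.Int.floordiv (cards.length : Int) 2 = ((cards.length / 2 : Nat) : Int) := by
      exact_mod_cast PySem.Int.floordiv_natCast cards.length 2
    simp only [hmid, PySem.List.slice_to_natCast, PySem.List.slice_from_natCast,
      List.length_take, List.length_drop]
    omega

def solution_alt (sizes : List (List Int)) : Int :=
  let p := solutionAltRec sizes
  p.1 * p.2

-- ===== PRECONDITION & SPEC =====
-- Pre_ excludes exactly the inputs on which Python A raises ValueError: empty sizes (max([]))
-- and any empty card (max(i) on an empty list).
def Pre_solution (sizes : List (List Int)) : Prop :=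
  sizes ≠ [] ∧ ∀ c ∈ sizes, c ≠ []
instance (sizes : List (List Int)) : Decidable (Pre_solution sizes) := by
  unfold Pre_solution; infer_instance
def pvWitness_solution : List (List Int) := [[60, 50], [30, 70], [60, 30], [80, 40]]
def Spec_solution (sizes : List (List Int)) (out : Int) : Prop := out = solution_alt sizes
instance (sizes : List (List Int)) (out : Int) : Decidable (Spec_solution sizes out) := by unfold Spec_solution; infer_instance

-- ===== CLAIM (what is proved, stated in full; the proofs are below) =====
def Claim_equal_solution : Prop := ∀ (sizes : List (List Int)), Dom_solution sizes → Pre_solution sizes → Spec_solution sizes (solution sizes)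

-- ===== LEMMAS AND PROOFS =====

-- running maximum / minimum of a nonempty list (0 is never used: lists below are nonempty)
def pvM : List Int → Int
  | [] => 0
  | x :: t => t.foldl max x

def pvMin : List Int → Int
  | [] => 0
  | x :: t => t.foldl min x

theorem pvFoldlMax_spec (t : List Int) (a : Int) :
    (t.foldl max a = a ∨ t.foldl max a ∈ t) ∧ a ≤ t.foldl max a ∧ ∀ y ∈ t, y ≤ t.foldl max a := by
  induction t generalizing a with
  | nil => simp
  | cons x s ih =>
    obtain ⟨hm, hle, hall⟩ := ih (max a x)
    refine ⟨?_, ?_, ?_⟩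
    · simp only [List.foldl, List.mem_cons]
      rcases hm with h | h
      · rcases le_total a x with hx | hx
        · right; left; rw [h]; omega
        · left; rw [h]; omega
      · right; right; exact h
    · simp only [List.foldl]; omega
    · intro y hy
      simp only [List.mem_cons] at hy
      rcases hy with rfl | hy
      · simp only [List.foldl]; omega
      · exact hall y hy

theorem pvM_mem (l : List Int) (h : l ≠ []) : pvM l ∈ l := by
  cases l with
  | nil => exact absurd rfl h
  | cons x t =>
    obtain ⟨hm, _, _⟩ := pvFoldlMax_spec t x
    simp only [pvM, List.mem_cons]
    rcases hm with h | h
    · left; exact h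
    · right; exact h

theorem pvM_isMax (l : List Int) : ∀ y ∈ l, y ≤ pvM l := by
  cases l with
  | nil => simp
  | cons x t =>
    obtain ⟨_, hle, hall⟩ := pvFoldlMax_spec t x
    intro y hy
    simp only [List.mem_cons] at hy
    rcases hy with rfl | hy
    · exact hle
    · exact hall y hy

theorem pvM_unique (l : List Int) (m : Int) (hmem : m ∈ l) (hmax : ∀ y ∈ l, y ≤ m) :
    pvM l = m := by
  have h1 : pvM l ≤ m := hmax _ (pvM_mem l (by rintro rfl; simp at hmem))
  have h2 : m ≤ pvM l := pvM_isMax l m hmem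
  omega

theorem pvFoldlMin_spec (t : List Int) (a : Int) :
    (t.foldl min a = a ∨ t.foldl min a ∈ t) ∧ t.foldl min a ≤ a ∧ ∀ y ∈ t, t.foldl min a ≤ y := by
  induction t generalizing a with
  | nil => simp
  | cons x s ih =>
    obtain ⟨hm, hle, hall⟩ := ih (min a x)
    refine ⟨?_, ?_, ?_⟩
    · simp only [List.foldl, List.mem_cons]
      rcases hm with h | h
      · rcases le_total a x with hx | hx
        · left; rw [h]; omega
        · right; left; rw [h]; omega
      · right; right; exact h
    · simp only [List.foldl]; omega
    · intro y hy
      simp only [List.mem_cons] at hy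
      rcases hy with rfl | hy
      · simp only [List.foldl]; omega
      · exact hall y hy

theorem pvMin_mem (l : List Int) (h : l ≠ []) : pvMin l ∈ l := by
  cases l with
  | nil => exact absurd rfl h
  | cons x t =>
    obtain ⟨hm, _, _⟩ := pvFoldlMin_spec t x
    simp only [pvMin, List.mem_cons]
    rcases hm with h | h
    · left; exact h
    · right; exact h

theorem pvMin_isMin (l : List Int) : ∀ y ∈ l, pvMin l ≤ y := by
  cases l with
  | nil => simp
  | cons x t =>
    obtain ⟨_, hle, hall⟩ := pvFoldlMin_spec t x
    intro y hy
    simp only [List.mem_cons] at hy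
    rcases hy with rfl | hy
    · exact hle
    · exact hall y hy

theorem pvMin_unique (l : List Int) (m : Int) (hmem : m ∈ l) (hmin : ∀ y ∈ l, m ≤ y) :
    pvMin l = m := by
  have h1 : m ≤ pvMin l := hmin _ (pvMin_mem l (by rintro rfl; simp at hmem))
  have h2 : pvMin l ≤ m := pvMin_isMin l m hmem
  omega

-- per-card values as A computes them
def pvFa (c : List Int) : Int := (PySem.List.max? c (fun y => y)).getD 0
def pvGa (c : List Int) : Int := (PySem.List.min? c (fun y => y)).getD 0

-- per-card values as B computes them (endpoints of the sorted card)
def pvFb (c : List Int) : Int :=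
  (PySem.List.pyGet? (PySem.List.sorted c (fun y => y) false) (-1)).getD 0
def pvGb (c : List Int) : Int :=
  (PySem.List.pyGet? (PySem.List.sorted c (fun y => y) false) 0).getD 0

theorem pvFa_eq_pvM (c : List Int) (h : c ≠ []) : pvFa c = pvM c := by
  cases c with
  | nil => exact absurd rfl h
  | cons x t => simp [pvFa, pvM, PySem.List.max?_id_cons]

theorem pvGa_eq_pvMin (c : List Int) (h : c ≠ []) : pvGa c = pvMin c := by
  cases c with
  | nil => exact absurd rfl h
  | cons x t => simp [pvGa, pvMin, PySem.List.min?_id_cons]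

theorem pairwise_le_getLast (s : List Int) (h : s.Pairwise (· ≤ ·)) (hne : s ≠ []) :
    ∀ y ∈ s, y ≤ s.getLast hne := by
  induction s with
  | nil => simp
  | cons x t ih =>
    intro y hy
    rcases List.pairwise_cons.mp h with ⟨hx, ht⟩
    cases t with
    | nil =>
      simp only [List.mem_cons, List.not_mem_nil, or_false] at hy
      simp [hy, List.getLast]
    | cons z u =>
      rw [List.getLast_cons (by simp)]
      rcases List.mem_cons.mp hy with rfl | hy2
      · calc y ≤ z := hx z (List.mem_cons_self ..)
             _ ≤ (z :: u).getLast (by simp) :=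
               (ih ht (by simp)) z (List.mem_cons_self ..)
      · exact (ih ht (by simp)) y hy2

theorem pvFb_eq_pvM (c : List Int) (h : c ≠ []) : pvFb c = pvM c := by
  have hperm : (PySem.List.sorted c (fun y => y) false).Perm c :=
    PySem.List.sorted_perm c (fun y => y) false
  have hsne : PySem.List.sorted c (fun y => y) false ≠ [] := by
    rw [Ne, PySem.List.sorted_eq_nil_iff]; exact h
  rw [pvFb, PySem.List.pyGet?_neg_one, List.getLast?_eq_some_getLast hsne, Option.getD_some]
  symm
  apply pvM_unique
  · exact hperm.mem_iff.mp (List.getLast_mem hsne)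
  · intro y hy
    exact pairwise_le_getLast _ (PySem.List.sorted_pairwise c (fun y => y)) hsne _
      (hperm.mem_iff.mpr hy)

theorem pvGb_eq_pvMin (c : List Int) (h : c ≠ []) : pvGb c = pvMin c := by
  have hperm : (PySem.List.sorted c (fun y => y) false).Perm c :=
    PySem.List.sorted_perm c (fun y => y) false
  have hsne : PySem.List.sorted c (fun y => y) false ≠ [] := by
    rw [Ne, PySem.List.sorted_eq_nil_iff]; exact h
  cases hcs : PySem.List.sorted c (fun y => y) false with
  | nil => exact absurd hcs hsne
  | cons m t =>
    rw [pvGb, hcs]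
    simp only [PySem.List.pyGet?_zero, List.getElem?_cons_zero, Option.getD_some]
    symm
    apply pvMin_unique
    · exact hperm.mem_iff.mp (by rw [hcs]; exact List.mem_cons_self ..)
    · intro y hy
      exact PySem.List.key_head_sorted_le c (fun y => y) hcs y hy

-- A's loop builds exactly the two mapped lists.
theorem pvA_fold (sizes : List (List Int)) (w h : List Int) :
    sizes.foldl (fun (wh : List Int × List Int) i =>
      ((wh.1 ++ [(PySem.List.max? i (fun y => y)).getD 0],
        wh.2 ++ [(PySem.List.min? i (fun y => y)).getD 0]) : List Int × List Int)) (w, h)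
    = (w ++ sizes.map pvFa, h ++ sizes.map pvGa) := by
  induction sizes generalizing w h with
  | nil => simp
  | cons c rest ih => simp [List.foldl, ih, pvFa, pvGa]

theorem solution_eq_pvM (sizes : List (List Int)) (h : sizes ≠ []) :
    solution sizes = pvM (sizes.map pvFa) * pvM (sizes.map pvGa) := by
  cases sizes with
  | nil => exact absurd rfl h
  | cons c rest =>
    simp only [solution, pvA_fold, List.nil_append, List.map_cons,
      PySem.List.max?_id_cons, Option.getD_some, pvM]

theorem pvM_append (l1 l2 : List Int) (h1 : l1 ≠ []) (h2 : l2 ≠ []) :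
    pvM (l1 ++ l2) = max (pvM l1) (pvM l2) := by
  apply pvM_unique
  · rcases le_total (pvM l1) (pvM l2) with h | h
    · simp only [max_eq_right h, List.mem_append]; right; exact pvM_mem l2 h2
    · simp only [max_eq_left h, List.mem_append]; left; exact pvM_mem l1 h1
  · intro y hy
    rcases List.mem_append.mp hy with hy | hy
    · have := pvM_isMax l1 y hy; omega
    · have := pvM_isMax l2 y hy; omega

-- B's recursion computes the running maxima of the two per-card value lists.
theorem solutionAltRec_eq (cards : List (List Int)) (h : cards ≠ []) :
    solutionAltRec cards = (pvM (cards.map pvFb), pvM (cards.map pvGb)) := by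
  induction hn : cards.length using Nat.strong_induction_on generalizing cards with
  | _ n ih =>
    subst hn
    cases hone : decide (cards.length = 1) with
    | true =>
      have h1 : cards.length = 1 := of_decide_eq_true hone
      obtain ⟨c, rfl⟩ : ∃ c, cards = [c] := by
        cases cards with
        | nil => simp at h1
        | cons a t => cases t with
          | nil => exact ⟨a, rfl⟩
          | cons b u => simp at h1
      rw [solutionAltRec]
      simp [PySem.List.pyGet?, PySem.List.pyIdx?, pvFb, pvGb, pvM]
    | false =>
      have h1 : cards.length ≠ 1 := of_decide_eq_false hone
      have hlen : 2 ≤ cards.length := by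
        cases cards with
        | nil => exact absurd rfl h
        | cons a t => simp only [List.length_cons] at h1 ⊢; omega
      rw [solutionAltRec]
      have hmid : PySem.Int.floordiv (cards.length : Int) 2 = ((cards.length / 2 : Nat) : Int) := by
        exact_mod_cast PySem.Int.floordiv_natCast cards.length 2
      simp only [if_neg h1, if_neg (by omega : ¬ cards.length < 1), hmid,
        PySem.List.slice_to_natCast, PySem.List.slice_from_natCast]
      set k := cards.length / 2 with hk
      have hk1 : 1 ≤ k := by omega
      have hkl : k < cards.length := by omega
      have htne : cards.take k ≠ [] := by
        intro h0
        have := congrArg List.length h0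
        simp only [List.length_take, List.length_nil] at this
        omega
      have hdne : cards.drop k ≠ [] := by
        intro h0
        have := congrArg List.length h0
        simp only [List.length_drop, List.length_nil] at this
        omega
      rw [ih (cards.take k).length (by simp only [List.length_take]; omega) _ htne rfl,
          ih (cards.drop k).length (by simp only [List.length_drop]; omega) _ hdne rfl]
      have hsplit : cards = cards.take k ++ cards.drop k := (List.take_append_drop k cards).symm
      have hmapne1 : ∀ g : List Int → Int, (cards.take k).map g ≠ [] := by
        intro g h0; exact htne (List.map_eq_nil_iff.mp h0)
      have hmapne2 : ∀ g : List Int → Int, (cards.drop k).map g ≠ [] := by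
        intro g h0; exact hdne (List.map_eq_nil_iff.mp h0)
      conv_rhs => rw [hsplit]
      simp only [List.map_append]
      rw [pvM_append _ _ (hmapne1 pvFb) (hmapne2 pvFb),
          pvM_append _ _ (hmapne1 pvGb) (hmapne2 pvGb)]

theorem solution_eq_alt (sizes : List (List Int)) (h : Pre_solution sizes) :
    solution sizes = solution_alt sizes := by
  obtain ⟨hne, hall⟩ := h
  have hmapF : sizes.map pvFb = sizes.map pvFa := by
    apply List.map_congr_left
    intro c hc
    rw [pvFb_eq_pvM c (hall c hc), pvFa_eq_pvM c (hall c hc)]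
  have hmapG : sizes.map pvGb = sizes.map pvGa := by
    apply List.map_congr_left
    intro c hc
    rw [pvGb_eq_pvMin c (hall c hc), pvGa_eq_pvMin c (hall c hc)]
  rw [solution_eq_pvM sizes hne, solution_alt, solutionAltRec_eq sizes hne, hmapF, hmapG]

-- ===== VERDICT (by name: the statement is the Claim_ definition above) =====
theorem solution_spec : Claim_equal_solution := by
  intro sizes _ hpre
  exact solution_eq_alt sizes hpre
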